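-- pv_equiv track=rewrite | github.com/nathaly-vergel/Official-Sensitivity-Analysis-and-Surrogate-Modeling-of-PEM-Fuel-Cells | src/FE/auxiliar_func_FE.py | compare_selected_features
-- ===== SOURCE A (Python) =====
-- def compare_selected_features(dict_a, dict_b, name_a="SHAP", name_b="Sobol"):
--     """
--     Compare two feature-selection dictionaries and report:
--     - Shared features across all regions (intersection per method)
--     - Common features across both methods
--     - Unique features added by each method
--
--     Parameters
--     ----------
--     dict_a : dict
--         First selection dictionary (e.g., SHAP).
--     dict_b : dict
--         Second selection dictionary (e.g., Sobol).
--     name_a : str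
--         Name of first method (for reporting).
--     name_b : str
--         Name of second method (for reporting).
--
--     Returns
--     -------
--     common_features : set
--         Features shared across all regions and both methods.
--     additional_features : dict
--         Features unique to each method (not in the shared intersection).
--     """
--     # Features selected across all regions (intersection within method)
--     shared_a = set.intersection(*(set(features) for features in dict_a.values()))
--     shared_b = set.intersection(*(set(features) for features in dict_b.values()))
--
--     # Common features (intersection across both methods)
--     common_features = shared_a & shared_b
--
--     # Additional features unique to each method
--     additional_features = {
--         name_a: sorted(shared_a - common_features),
--         name_b: sorted(shared_b - common_features)
--     }
--
--     return sorted(common_features), additional_features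
-- ===== SOURCE B (Python) =====
-- def compare_selected_features(dict_a, dict_b, name_a="SHAP", name_b="Sobol"):
--     shared_a = _shared_across_regions(dict_a)
--     shared_b = _shared_across_regions(dict_b)
--     common_features = shared_a & shared_b
--     additional_features = {
--         name_a: sorted(shared_a - common_features),
--         name_b: sorted(shared_b - common_features)
--     }
--     return sorted(common_features), additional_features
--
--
-- def _shared_across_regions(d):
--     """Tally in how many regions each feature occurs (deduplicating each
--     region first); a feature is shared iff its tally equals len(d)."""
--     counts = {}
--     for features in d.values():
--         for f in dict.fromkeys(features):
--             counts[f] = counts.get(f, 0) + 1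
--     n = len(d)
--     return {f for f, c in counts.items() if c == n}
-- ===== Notes on version B (the rewrite author's own statement) =====
-- stated objective: idiomatic
-- what changed: Per-method shared features are computed by a single tally pass (count per feature how many regions contain it after deduplication, keep those whose count equals the number of regions) instead of folding pairwise set intersections over the regions.
import Mathlib
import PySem

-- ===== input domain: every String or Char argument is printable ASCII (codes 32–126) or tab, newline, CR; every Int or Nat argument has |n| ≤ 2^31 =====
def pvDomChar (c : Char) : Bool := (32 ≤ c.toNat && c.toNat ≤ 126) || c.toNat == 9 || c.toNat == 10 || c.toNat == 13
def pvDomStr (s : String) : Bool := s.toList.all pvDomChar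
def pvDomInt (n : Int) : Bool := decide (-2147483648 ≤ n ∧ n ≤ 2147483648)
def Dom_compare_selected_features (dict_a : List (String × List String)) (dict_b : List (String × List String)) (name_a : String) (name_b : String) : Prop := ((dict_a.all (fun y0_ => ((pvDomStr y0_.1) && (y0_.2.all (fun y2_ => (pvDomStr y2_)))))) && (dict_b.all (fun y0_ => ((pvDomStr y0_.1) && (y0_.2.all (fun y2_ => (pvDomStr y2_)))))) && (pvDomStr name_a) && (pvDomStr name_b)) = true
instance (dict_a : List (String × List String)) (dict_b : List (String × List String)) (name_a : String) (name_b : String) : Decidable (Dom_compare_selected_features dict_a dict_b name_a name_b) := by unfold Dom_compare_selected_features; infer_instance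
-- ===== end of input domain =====

-- B computes each method's per-region shared features by one tally pass (count regions
-- containing each feature, keep counts equal to the number of regions) instead of A's
-- fold of pairwise set intersections; equivalent output, more idiomatic.


-- ===== PORT A =====
-- set.intersection(*(set(features) for features in d.values())): the first region's
-- set folded with pairwise intersection against the remaining regions' sets.
-- On [] (empty dict) the Python raises TypeError — excluded by Pre_; the port's []
-- value there is never claimed.
def pvInterAll (vals : List (List String)) : PySem.Set String :=
  match vals with
  | [] => []
  | f :: rest => rest.foldl (fun acc fs => PySem.Set.inter acc (PySem.Set.ofList fs)) (PySem.Set.ofList f)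

def compare_selected_features (dict_a : List (String × List String)) (dict_b : List (String × List String)) (name_a : String) (name_b : String) : List String × (List (String × List String)) :=
  let shared_a := pvInterAll (dict_a.map (·.2))
  let shared_b := pvInterAll (dict_b.map (·.2))
  let common_features := PySem.Set.inter shared_a shared_b
  let additional_features :=
    (PySem.Dict.empty.insert name_a (PySem.List.sorted (PySem.Set.diff shared_a common_features) (fun x => x))).insert
      name_b (PySem.List.sorted (PySem.Set.diff shared_b common_features) (fun x => x))
  (PySem.List.sorted common_features (fun x => x), additional_features.items)

-- ===== PORT B =====
-- counts[f] = counts.get(f, 0) + 1 over dict.fromkeys(features) for each region.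
def pvTally (d : List (String × List String)) : PySem.Dict String Int :=
  d.foldl (fun c p => (PySem.List.dedup p.2).foldl (fun c f => c.insert f (c.getD f 0 + 1)) c) PySem.Dict.empty

-- {f for f, c in counts.items() if c == n}
def pvSharedAcrossRegions (d : List (String × List String)) : PySem.Set String :=
  let counts := pvTally d
  let n : Int := d.length
  PySem.Set.ofList ((counts.items.filter (fun p => p.2 == n)).map (·.1))

def compare_selected_features_alt (dict_a : List (String × List String)) (dict_b : List (String × List String)) (name_a : String) (name_b : String) : List String × (List (String × List String)) :=
  let shared_a := pvSharedAcrossRegions dict_a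
  let shared_b := pvSharedAcrossRegions dict_b
  let common_features := PySem.Set.inter shared_a shared_b
  let additional_features :=
    (PySem.Dict.empty.insert name_a (PySem.List.sorted (PySem.Set.diff shared_a common_features) (fun x => x))).insert
      name_b (PySem.List.sorted (PySem.Set.diff shared_b common_features) (fun x => x))
  (PySem.List.sorted common_features (fun x => x), additional_features.items)

-- ===== PRECONDITION & SPEC =====
-- Pre_ excludes empty dicts, on which the Python A raises TypeError
-- (set.intersection called with no arguments).
def Pre_compare_selected_features (dict_a : List (String × List String)) (dict_b : List (String × List String)) (name_a : String) (name_b : String) : Prop :=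
  dict_a ≠ [] ∧ dict_b ≠ []
instance (dict_a : List (String × List String)) (dict_b : List (String × List String)) (name_a : String) (name_b : String) : Decidable (Pre_compare_selected_features dict_a dict_b name_a name_b) := by unfold Pre_compare_selected_features; infer_instance

def pvWitness_compare_selected_features : (List (String × List String)) × (List (String × List String)) × String × String :=
  ([("r1", ["a", "b"]), ("r2", ["b"])], [("r1", ["b", "c"])], "SHAP", "Sobol")

def Spec_compare_selected_features (dict_a : List (String × List String)) (dict_b : List (String × List String)) (name_a : String) (name_b : String) (out : List String × (List (String × List String))) : Prop := out = compare_selected_features_alt dict_a dict_b name_a name_b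
instance (dict_a : List (String × List String)) (dict_b : List (String × List String)) (name_a : String) (name_b : String) (out : List String × (List (String × List String))) : Decidable (Spec_compare_selected_features dict_a dict_b name_a name_b out) := by unfold Spec_compare_selected_features; infer_instance

-- ===== CLAIM (what is proved, stated in full; the proofs are below) =====
def Claim_equal_compare_selected_features : Prop := ∀ (dict_a : List (String × List String)) (dict_b : List (String × List String)) (name_a : String) (name_b : String), Dom_compare_selected_features dict_a dict_b name_a name_b → Pre_compare_selected_features dict_a dict_b name_a name_b → Spec_compare_selected_features dict_a dict_b name_a name_b (compare_selected_features dict_a dict_b name_a name_b)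


-- ===== LEMMAS AND PROOFS =====

theorem mem_foldl_inter (l : List (List String)) (acc : PySem.Set String) (x : String) :
    x ∈ l.foldl (fun acc fs => PySem.Set.inter acc (PySem.Set.ofList fs)) acc ↔
      x ∈ acc ∧ ∀ fs ∈ l, x ∈ fs := by
  induction l generalizing acc with
  | nil => simp
  | cons f rest ih =>
      simp [List.foldl_cons, ih, PySem.Set.mem_inter, PySem.Set.mem_ofList]
      tauto

theorem nodup_foldl_inter (l : List (List String)) (acc : PySem.Set String) (h : acc.Nodup) :
    (l.foldl (fun acc fs => PySem.Set.inter acc (PySem.Set.ofList fs)) acc).Nodup := by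
  induction l generalizing acc with
  | nil => exact h
  | cons f rest ih => exact ih _ (List.Nodup.filter _ h)

theorem mem_pvInterAll (d : List (String × List String)) (hd : d ≠ []) (x : String) :
    x ∈ pvInterAll (d.map (·.2)) ↔ ∀ p ∈ d, x ∈ p.2 := by
  cases d with
  | nil => exact absurd rfl hd
  | cons q rest =>
      simp only [List.map_cons, pvInterAll, mem_foldl_inter, PySem.Set.mem_ofList]
      simp
      tauto

theorem nodup_pvInterAll (vals : List (List String)) : (pvInterAll vals).Nodup := by
  cases vals with
  | nil => simp [pvInterAll]
  | cons f rest => exact nodup_foldl_inter _ _ (PySem.Set.nodup_ofList f)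

theorem getD_pvTally_fold (d : List (String × List String)) (c : PySem.Dict String Int) (x : String) :
    (d.foldl (fun c p => (PySem.List.dedup p.2).foldl (fun c f => c.insert f (c.getD f 0 + 1)) c) c).getD x 0
      = c.getD x 0 + (d.countP (fun p => decide (x ∈ p.2)) : Int) := by
  induction d generalizing c with
  | nil => simp
  | cons q rest ih =>
      rw [List.foldl_cons, ih, PySem.Dict.getD_foldl_insert_add_one]
      rw [List.countP_cons]
      have hcount : List.count x (PySem.List.dedup q.2) = if x ∈ q.2 then 1 else 0 := by
        by_cases hx : x ∈ q.2
        · rw [if_pos hx]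
          exact List.count_eq_one_of_mem (PySem.List.nodup_dedup q.2)
            ((PySem.List.mem_dedup q.2 x).mpr hx)
        · rw [if_neg hx]
          exact List.count_eq_zero.mpr (fun hm => hx ((PySem.List.mem_dedup q.2 x).mp hm))
      rw [hcount]
      by_cases hx : x ∈ q.2 <;> simp only [hx, if_true, if_false, decide_true, decide_false] <;>
        push_cast <;> ring

theorem keys_pvTally_fold (d : List (String × List String)) (c : PySem.Dict String Int) (x : String) :
    (x ∈ (d.foldl (fun c p => (PySem.List.dedup p.2).foldl (fun c f => c.insert f (c.getD f 0 + 1)) c) c).keys) ↔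
      x ∈ c.keys ∨ ∃ p ∈ d, x ∈ p.2 := by
  induction d generalizing c with
  | nil => simp
  | cons q rest ih =>
      rw [List.foldl_cons, ih, PySem.Dict.keys_foldl_insert]
      simp [PySem.Set.mem_update]
      tauto

theorem nodup_keys_pvTally_fold (d : List (String × List String)) (c : PySem.Dict String Int)
    (h : c.keys.Nodup) :
    (d.foldl (fun c p => (PySem.List.dedup p.2).foldl (fun c f => c.insert f (c.getD f 0 + 1)) c) c).keys.Nodup := by
  induction d generalizing c with
  | nil => exact h
  | cons q rest ih =>
      exact ih _ (PySem.Dict.nodup_keys_foldl_insert _ (fun d x => d.getD x 0 + 1) _ h)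

theorem getD_pvTally (d : List (String × List String)) (x : String) :
    (pvTally d).getD x 0 = (d.countP (fun p => decide (x ∈ p.2)) : Int) := by
  unfold pvTally
  rw [getD_pvTally_fold]
  simp

theorem mem_pvShared (d : List (String × List String)) (hd : d ≠ []) (x : String) :
    x ∈ pvSharedAcrossRegions d ↔ ∀ p ∈ d, x ∈ p.2 := by
  have hnk : (pvTally d).keys.Nodup := nodup_keys_pvTally_fold d _ PySem.Dict.nodup_keys_empty
  unfold pvSharedAcrossRegions
  simp only [PySem.Set.mem_ofList, List.mem_map, List.mem_filter]
  constructor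
  · rintro ⟨⟨k, v⟩, ⟨hm, hv⟩, rfl⟩
    have hg : (pvTally d).getD k 0 = v := PySem.Dict.getD_of_mem_items _ hm hnk 0
    rw [getD_pvTally] at hg
    have hv' : v = (d.length : Int) := by simpa using hv
    have hcp : d.countP (fun p => decide (k ∈ p.2)) = d.length := by
      have := hg.trans hv'
      exact_mod_cast this
    intro p hp
    simpa using List.countP_eq_length.mp hcp p hp
  · intro h
    have hcp : d.countP (fun p => decide (x ∈ p.2)) = d.length :=
      List.countP_eq_length.mpr (fun p hp => by simpa using h p hp)
    have hg : (pvTally d).getD x 0 = (d.length : Int) := by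
      rw [getD_pvTally, hcp]
    obtain ⟨p0, hp0⟩ : ∃ p, p ∈ d := by
      cases d with
      | nil => exact absurd rfl hd
      | cons a t => exact ⟨a, List.mem_cons_self⟩
    have hkeys : x ∈ (pvTally d).keys := by
      unfold pvTally
      exact (keys_pvTally_fold d _ x).mpr (Or.inr ⟨p0, hp0, h p0 hp0⟩)
    have hcont : (pvTally d).contains x = true :=
      (PySem.Dict.contains_iff_mem_keys _ _).mpr hkeys
    rw [PySem.Dict.contains_eq_isSome_get?] at hcont
    obtain ⟨v, hv⟩ := Option.isSome_iff_exists.mp hcont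
    have : (pvTally d).getD x 0 = v := by rw [PySem.Dict.getD_eq_get?_getD, hv]; rfl
    have hvn : v = (d.length : Int) := by rw [← this, hg]
    refine ⟨(x, v), ⟨PySem.Dict.mem_items_of_get?_eq_some _ hv, by simp [hvn]⟩, rfl⟩

theorem nodup_pvShared (d : List (String × List String)) : (pvSharedAcrossRegions d).Nodup :=
  PySem.Set.nodup_ofList _

theorem sorted_set_congr (s t : PySem.Set String) (hs : s.Nodup) (ht : t.Nodup)
    (h : ∀ x, x ∈ s ↔ x ∈ t) :
    PySem.List.sorted s (fun x => x) = PySem.List.sorted t (fun x => x) :=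
  (PySem.List.sorted_id_eq_sorted_id_iff_perm s t).mpr ((List.perm_ext_iff_of_nodup hs ht).mpr h)

-- ===== VERDICT (by name: the statement is the Claim_ definition above) =====
theorem compare_selected_features_spec : Claim_equal_compare_selected_features := by
  intro da db na nb _ hpre
  obtain ⟨ha, hb⟩ := hpre
  unfold Spec_compare_selected_features compare_selected_features compare_selected_features_alt
  have hSA := fun x => (mem_pvInterAll da ha x).trans (mem_pvShared da ha x).symm
  have hSB := fun x => (mem_pvInterAll db hb x).trans (mem_pvShared db hb x).symm
  have nA := nodup_pvInterAll (da.map (·.2)); have nA' := nodup_pvShared da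
  have nB := nodup_pvInterAll (db.map (·.2)); have nB' := nodup_pvShared db
  have hcommon : ∀ x, x ∈ PySem.Set.inter (pvInterAll (da.map (·.2))) (pvInterAll (db.map (·.2))) ↔
      x ∈ PySem.Set.inter (pvSharedAcrossRegions da) (pvSharedAcrossRegions db) := by
    intro x; simp only [PySem.Set.mem_inter, hSA, hSB]
  have ncA : (PySem.Set.inter (pvInterAll (da.map (·.2))) (pvInterAll (db.map (·.2)))).Nodup :=
    List.Nodup.filter _ nA
  have ncA' : (PySem.Set.inter (pvSharedAcrossRegions da) (pvSharedAcrossRegions db)).Nodup :=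
    List.Nodup.filter _ nA'
  have e1 := sorted_set_congr _ _ ncA ncA' hcommon
  have e2 := sorted_set_congr
      (PySem.Set.diff (pvInterAll (da.map (·.2))) (PySem.Set.inter (pvInterAll (da.map (·.2))) (pvInterAll (db.map (·.2)))))
      (PySem.Set.diff (pvSharedAcrossRegions da) (PySem.Set.inter (pvSharedAcrossRegions da) (pvSharedAcrossRegions db)))
      (List.Nodup.filter _ nA) (List.Nodup.filter _ nA')
      (by intro x; simp only [PySem.Set.mem_diff, PySem.Set.mem_inter, hSA, hSB])
  have e3 := sorted_set_congr
      (PySem.Set.diff (pvInterAll (db.map (·.2))) (PySem.Set.inter (pvInterAll (da.map (·.2))) (pvInterAll (db.map (·.2)))))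
      (PySem.Set.diff (pvSharedAcrossRegions db) (PySem.Set.inter (pvSharedAcrossRegions da) (pvSharedAcrossRegions db)))
      (List.Nodup.filter _ nB) (List.Nodup.filter _ nB')
      (by intro x; simp only [PySem.Set.mem_diff, PySem.Set.mem_inter, hSA, hSB])
  simp only [e1, e2, e3]
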